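-- pv_equiv track=rewrite | github.com/ymakwanamath/BioSNOW | SNOW for Testing.py | Xor_list
-- ===== SOURCE A (Python) =====
-- def Xor_list(list_of_lists):
--     #This function defines xoring of a list of lists
--     c=[]
--     for i in range(len(list_of_lists[0])):
--         x=list_of_lists[0][i]
--         for j in range(1,len(list_of_lists)):
--             x=x^list_of_lists[j][i]
--         c.append(x)
--     return(c)
-- ===== SOURCE B (Python) =====
-- def Xor_list(list_of_lists):
--     # Row-major single pass: keep a running vector and xor each later row into it.
--     acc = list(list_of_lists[0])
--     for row in list_of_lists[1:]:
--         acc = [a ^ row[i] for i, a in enumerate(acc)]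
--     return acc
-- ===== Notes on version B (the rewrite author's own statement) =====
-- stated objective: alternative
-- what changed: Replaced the column-major nested index loops (outer over positions, inner over row indices) by a row-major single pass that folds each subsequent row into a running accumulator vector; requires proving the traversal-order swap preserves the result.
import Mathlib
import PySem

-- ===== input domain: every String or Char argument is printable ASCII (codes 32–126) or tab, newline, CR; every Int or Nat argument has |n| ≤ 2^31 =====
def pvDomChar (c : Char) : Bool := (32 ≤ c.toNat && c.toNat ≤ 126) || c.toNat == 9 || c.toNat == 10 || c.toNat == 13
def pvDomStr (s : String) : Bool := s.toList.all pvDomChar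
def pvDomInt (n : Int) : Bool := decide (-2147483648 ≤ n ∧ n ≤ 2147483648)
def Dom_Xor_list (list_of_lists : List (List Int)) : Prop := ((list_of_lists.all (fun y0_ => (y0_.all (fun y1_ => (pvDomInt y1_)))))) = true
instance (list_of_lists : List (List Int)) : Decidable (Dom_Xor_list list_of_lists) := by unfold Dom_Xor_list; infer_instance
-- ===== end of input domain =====

-- B changes the traversal: a row-major single pass with a vector accumulator instead of
-- A's column-major nested index loops (objective: alternative; same asymptotic cost).

-- ===== PORT A =====
-- Literal port of A: outer loop over range(len(list_of_lists[0])) appending to c,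
-- inner loop over range(1, len(list_of_lists)) xoring; indexing via getD (Pre_ keeps it in range).
def Xor_list (list_of_lists : List (List Int)) : List Int :=
  (List.range (list_of_lists.headD []).length).foldl
    (fun c i =>
      let x0 := (list_of_lists.headD []).getD i 0
      let x := (List.range' 1 (list_of_lists.length - 1)).foldl
        (fun x j => PySem.Int.bxor x ((list_of_lists.getD j []).getD i 0)) x0
      c ++ [x]) []

-- ===== PORT B =====
-- Literal port of B: acc = list(list_of_lists[0]); for each later row,
-- acc = [a ^ row[i] for i, a in enumerate(acc)]  (indexing in range under Pre_).
def Xor_list_alt (list_of_lists : List (List Int)) : List Int :=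
  (list_of_lists.drop 1).foldl
    (fun acc row =>
      (PySem.List.enumerate acc).map
        (fun p => PySem.Int.bxor p.2 (PySem.List.pyGetD row p.1 0)))
    (list_of_lists.headD [])

-- ===== PRECONDITION & SPEC =====
-- Pre_: exactly where A returns — a nonempty list whose first row is no longer than any other row;
-- otherwise A raises IndexError.
def Pre_Xor_list (list_of_lists : List (List Int)) : Prop :=
  list_of_lists ≠ [] ∧ ∀ row ∈ list_of_lists, (list_of_lists.headD []).length ≤ row.length
instance (list_of_lists : List (List Int)) : Decidable (Pre_Xor_list list_of_lists) := by
  unfold Pre_Xor_list; infer_instance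
def pvWitness_Xor_list : List (List Int) := [[1, 2], [3, 4], [5, 6]]

def Spec_Xor_list (list_of_lists : List (List Int)) (out : List Int) : Prop := out = Xor_list_alt list_of_lists
instance (list_of_lists : List (List Int)) (out : List Int) : Decidable (Spec_Xor_list list_of_lists out) := by unfold Spec_Xor_list; infer_instance

-- ===== CLAIM =====
def Claim_equal_Xor_list : Prop := ∀ (list_of_lists : List (List Int)), Dom_Xor_list list_of_lists → Pre_Xor_list list_of_lists → Spec_Xor_list list_of_lists (Xor_list list_of_lists)

-- ===== LEMMAS AND PROOFS =====

-- A's outer loop (append one element per index) is a map over the range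
theorem pv_foldl_append {f : Nat → Int} (r : List Nat) (c : List Int) :
    r.foldl (fun c i => c ++ [f i]) c = c ++ r.map f := by
  induction r generalizing c with
  | nil => simp
  | cons a t ih => simp [List.foldl, ih]

-- A's inner loop over indices range' s rest.length into l (with l.drop s = rest)
-- equals a direct fold over rest
theorem pv_inner (rest : List (List Int)) (l : List (List Int)) (s : Nat)
    (hdrop : l.drop s = rest) (i : Nat) (x : Int) :
    (List.range' s rest.length).foldl (fun x j => PySem.Int.bxor x ((l.getD j []).getD i 0)) x
      = rest.foldl (fun x row => PySem.Int.bxor x (row.getD i 0)) x := by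
  induction rest generalizing s x with
  | nil => rfl
  | cons r t ih =>
    have hlen : s < l.length := by
      by_contra hn
      push Not at hn
      rw [List.drop_eq_nil_of_le hn] at hdrop
      exact (List.cons_ne_nil r t) hdrop.symm
    have hget : l.getD s [] = r := by
      have h0 : (l.drop s).getD 0 [] = r := by rw [hdrop]; rfl
      rw [← h0]
      simp [List.getD_eq_getElem?_getD, List.getElem?_drop]
    have hdrop' : l.drop (s + 1) = t := by
      have := congrArg (List.drop 1) hdrop
      simpa [List.drop_drop, Nat.add_comm] using this
    simp only [List.length_cons]
    rw [List.range'_succ]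
    simp only [List.foldl]
    rw [hget]
    exact ih (s + 1) hdrop' (PySem.Int.bxor x (r.getD i 0))

-- one B-step on an accumulator given as a map over range is a pointwise xor
theorem pv_step_map (n : Nat) (g : Nat → Int) (row : List Int) :
    (PySem.List.enumerate ((List.range n).map g)).map
        (fun p => PySem.Int.bxor p.2 (PySem.List.pyGetD row p.1 0))
      = (List.range n).map (fun i => PySem.Int.bxor (g i) (row.getD i 0)) := by
  apply List.ext_getElem?
  intro k
  by_cases hk : k < n
  · simp [PySem.List.getElem_enumerate, hk,
          PySem.List.pyGetD_natCast, List.getD_eq_getElem?_getD]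
  · simp [PySem.List.length_enumerate, hk]

-- B's row-major fold, started from a vector written as a map over range,
-- computes the column-wise folds (the traversal-order swap)
theorem pv_B_inv (rows : List (List Int)) (n : Nat) (g : Nat → Int) :
    rows.foldl
      (fun acc row =>
        (PySem.List.enumerate acc).map
          (fun p => PySem.Int.bxor p.2 (PySem.List.pyGetD row p.1 0)))
      ((List.range n).map g)
    = (List.range n).map
        (fun i => rows.foldl (fun x row => PySem.Int.bxor x (row.getD i 0)) (g i)) := by
  induction rows generalizing g with
  | nil => rfl
  | cons row t ih =>
    simp only [List.foldl]
    rw [pv_step_map, ih]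

-- a list is the map of getD over its index range
theorem pv_self_map (r : List Int) :
    r = (List.range r.length).map (fun i => r.getD i 0) := by
  apply List.ext_getElem?
  intro k
  by_cases hk : k < r.length
  · simp [hk, List.getD_eq_getElem?_getD]
  · simp [hk]

theorem Xor_list_eq_alt (l : List (List Int)) (hpre : Pre_Xor_list l) :
    Xor_list l = Xor_list_alt l := by
  obtain ⟨hne, _⟩ := hpre
  obtain ⟨r, rs, rfl⟩ := List.exists_cons_of_ne_nil hne
  unfold Xor_list Xor_list_alt
  simp only [List.headD_cons, List.drop_succ_cons, List.drop_zero]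
  rw [pv_foldl_append (f := fun i =>
    (List.range' 1 ((r :: rs).length - 1)).foldl
      (fun x j => PySem.Int.bxor x (((r :: rs).getD j []).getD i 0)) (r.getD i 0))]
  rw [List.nil_append]
  conv_rhs => rw [pv_self_map r]
  rw [pv_B_inv]
  apply List.map_congr_left
  intro i _
  have hdrop : (r :: rs).drop 1 = rs := rfl
  have hlen : (r :: rs).length - 1 = rs.length := by simp
  rw [hlen, pv_inner rs (r :: rs) 1 hdrop i (r.getD i 0)]

-- ===== VERDICT =====
theorem Xor_list_spec : Claim_equal_Xor_list := by
  intro l _ hpre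
  unfold Spec_Xor_list
  exact Xor_list_eq_alt l hpre
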